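-- pv_equiv track=rewrite | github.com/Dan-key/GeoCADPython | dxf_import.py | _walk_entities
-- ===== SOURCE A (Python) =====
-- def _walk_entities(raw_entities):
--     """Разделить сырые сущности, склеив POLYLINE с её VERTEX-ами/SEQEND.
--     Возвращает список (tags, etype, sub_tags) — для POLYLINE sub_tags —
--     список тегов вершин; для остальных — пустой список."""
--     out = []
--     i = 0
--     n = len(raw_entities)
--     while i < n:
--         ent = raw_entities[i]
--         etype = ent[0][1] if ent and ent[0][0] == 0 else None
--         if etype == 'POLYLINE':
--             verts = []
--             i += 1
--             while i < n:
--                 sub = raw_entities[i]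
--                 stype = sub[0][1] if sub and sub[0][0] == 0 else None
--                 if stype == 'VERTEX':
--                     verts.append(sub)
--                     i += 1
--                 elif stype == 'SEQEND':
--                     i += 1
--                     break
--                 else:
--                     break
--             out.append((ent, 'POLYLINE', verts))
--         else:
--             out.append((ent, etype, []))
--             i += 1
--     return out
-- ===== SOURCE B (Python) =====
-- def _walk_entities(raw_entities):
--     """State-machine rewrite: one flat pass; `current` holds the open POLYLINE group."""
--     out = []
--     current = None  # (polyline_tags, verts)
--     for ent in raw_entities:
--         etype = ent[0][1] if ent and ent[0][0] == 0 else None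
--         if current is not None:
--             if etype == 'VERTEX':
--                 current[1].append(ent)
--                 continue
--             if etype == 'SEQEND':
--                 out.append((current[0], 'POLYLINE', current[1]))
--                 current = None
--                 continue
--             out.append((current[0], 'POLYLINE', current[1]))
--             current = None
--         if etype == 'POLYLINE':
--             current = (ent, [])
--         else:
--             out.append((ent, etype, []))
--     if current is not None:
--         out.append((current[0], 'POLYLINE', current[1]))
--     return out
-- ===== Notes on version B (the rewrite author's own statement) =====
-- stated objective: simpler
-- what changed: Replaced A's nested while-loops with manual index advancement by a single flat for-loop state machine that keeps the currently open POLYLINE group in a `current` variable and flushes it on SEQEND, on any non-VERTEX terminator, or after the loop.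
import Mathlib
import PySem

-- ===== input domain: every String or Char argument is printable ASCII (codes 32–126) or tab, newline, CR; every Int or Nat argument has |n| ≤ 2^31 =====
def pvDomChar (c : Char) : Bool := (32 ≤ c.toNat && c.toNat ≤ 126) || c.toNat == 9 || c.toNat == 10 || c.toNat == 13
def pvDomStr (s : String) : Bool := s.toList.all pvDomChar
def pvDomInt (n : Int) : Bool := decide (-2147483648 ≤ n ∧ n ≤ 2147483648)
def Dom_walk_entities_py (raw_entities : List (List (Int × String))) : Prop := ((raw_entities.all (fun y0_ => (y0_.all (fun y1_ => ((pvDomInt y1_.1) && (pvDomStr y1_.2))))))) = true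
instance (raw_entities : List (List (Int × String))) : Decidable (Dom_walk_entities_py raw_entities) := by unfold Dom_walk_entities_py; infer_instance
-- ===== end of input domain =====

-- B replaces A's nested while-loops and manual index bookkeeping with a single flat pass
-- maintaining a `current` open-POLYLINE state (objective: simpler; same return value, no speed claim).

-- ===== PORT A =====
-- `ent[0][1] if ent and ent[0][0] == 0 else None`
def pvEtype (ent : List (Int × String)) : Option String :=
  match ent with
  | [] => none
  | (c, v) :: _ => if c = 0 then some v else none

-- A's inner while-loop: returns (verts, remaining entities after the loop)
def pvCollect : List (List (Int × String)) → (List (List (Int × String)) × List (List (Int × String)))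
  | [] => ([], [])
  | sub :: rest =>
    if pvEtype sub = some "VERTEX" then
      let p := pvCollect rest
      (sub :: p.1, p.2)
    else if pvEtype sub = some "SEQEND" then ([], rest)
    else ([], sub :: rest)

lemma pvCollect_len : ∀ l, (pvCollect l).2.length ≤ l.length := by
  intro l
  induction l with
  | nil => simp [pvCollect]
  | cons sub rest ih =>
    simp only [pvCollect]
    split_ifs
    · simp; omega
    · simp
    · simp

-- A's outer while-loop (structural recursion on the remaining entities)
def walk_entities_py (raw_entities : List (List (Int × String))) : List ((List (Int × String)) × Option String × (List (List (Int × String)))) :=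
  match raw_entities with
  | [] => []
  | ent :: rest =>
    if pvEtype ent = some "POLYLINE" then
      (ent, some "POLYLINE", (pvCollect rest).1) :: walk_entities_py (pvCollect rest).2
    else
      (ent, pvEtype ent, []) :: walk_entities_py rest
termination_by raw_entities.length
decreasing_by
  · have := pvCollect_len rest; simp; omega
  · simp

-- ===== PORT B =====
-- one step of B's flat for-loop; state = (out so far, open POLYLINE group or none)
def pvBOpen (out : List ((List (Int × String)) × Option String × (List (List (Int × String)))))
    (ent : List (Int × String)) (et : Option String) :
    List ((List (Int × String)) × Option String × (List (List (Int × String)))) × Option ((List (Int × String)) × List (List (Int × String))) :=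
  if et = some "POLYLINE" then (out, some (ent, []))
  else (out ++ [(ent, et, [])], none)

def pvBStep (st : List ((List (Int × String)) × Option String × (List (List (Int × String)))) × Option ((List (Int × String)) × List (List (Int × String))))
    (ent : List (Int × String)) :
    List ((List (Int × String)) × Option String × (List (List (Int × String)))) × Option ((List (Int × String)) × List (List (Int × String))) :=
  let et := pvEtype ent
  match st.2 with
  | some (pe, vs) =>
    if et = some "VERTEX" then (st.1, some (pe, vs ++ [ent]))
    else if et = some "SEQEND" then (st.1 ++ [(pe, some "POLYLINE", vs)], none)
    else pvBOpen (st.1 ++ [(pe, some "POLYLINE", vs)]) ent et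
  | none => pvBOpen st.1 ent et

-- the final `if current is not None: out.append(...)`
def pvBFlush (st : List ((List (Int × String)) × Option String × (List (List (Int × String)))) × Option ((List (Int × String)) × List (List (Int × String)))) :
    List ((List (Int × String)) × Option String × (List (List (Int × String)))) :=
  match st.2 with
  | some (pe, vs) => st.1 ++ [(pe, some "POLYLINE", vs)]
  | none => st.1

def walk_entities_py_alt (raw_entities : List (List (Int × String))) : List ((List (Int × String)) × Option String × (List (List (Int × String)))) :=
  pvBFlush (raw_entities.foldl pvBStep ([], none))

-- ===== PRECONDITION & SPEC =====
def Spec_walk_entities_py (raw_entities : List (List (Int × String))) (out : List ((List (Int × String)) × Option String × (List (List (Int × String))))) : Prop := out = walk_entities_py_alt raw_entities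
instance (raw_entities : List (List (Int × String))) (out : List ((List (Int × String)) × Option String × (List (List (Int × String))))) : Decidable (Spec_walk_entities_py raw_entities out) := by unfold Spec_walk_entities_py; infer_instance

-- ===== CLAIM (what is proved, stated in full; the proofs are below) =====
def Claim_equal_walk_entities_py : Prop := ∀ (raw_entities : List (List (Int × String))), Dom_walk_entities_py raw_entities → Spec_walk_entities_py raw_entities (walk_entities_py raw_entities)

-- ===== LEMMAS AND PROOFS =====

-- Invariant of B's fold: with no open group it produces A's result; with an open group
-- (pe, vs) it first completes that group exactly as A's inner loop (pvCollect) would.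
lemma pvKey : ∀ l : List (List (Int × String)),
    (∀ out, pvBFlush (l.foldl pvBStep (out, none)) = out ++ walk_entities_py l) ∧
    (∀ out pe vs, pvBFlush (l.foldl pvBStep (out, some (pe, vs))) =
      out ++ ((pe, some "POLYLINE", vs ++ (pvCollect l).1) :: walk_entities_py (pvCollect l).2)) := by
  intro l
  induction l with
  | nil =>
    constructor
    · intro out; simp [pvBFlush, walk_entities_py]
    · intro out pe vs; simp [pvBFlush, pvCollect, walk_entities_py]
  | cons ent rest ih =>
    obtain ⟨ih1, ih2⟩ := ih
    have h1 : ∀ out, pvBFlush ((ent :: rest).foldl pvBStep (out, none)) = out ++ walk_entities_py (ent :: rest) := by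
      intro out
      by_cases hp : pvEtype ent = some "POLYLINE"
      · simp only [List.foldl_cons, pvBStep, pvBOpen, hp, if_pos]
        rw [ih2]
        simp [walk_entities_py, hp]
      · simp only [List.foldl_cons, pvBStep, pvBOpen, hp, if_false]
        rw [ih1]
        simp [walk_entities_py, hp]
    refine ⟨h1, ?_⟩
    intro out pe vs
    by_cases hv : pvEtype ent = some "VERTEX"
    · simp only [List.foldl_cons, pvBStep, hv, if_pos]
      rw [ih2]
      simp [pvCollect, hv]
    · by_cases hs : pvEtype ent = some "SEQEND"
      · have hstep : pvBStep (out, some (pe, vs)) ent = (out ++ [(pe, some "POLYLINE", vs)], none) := by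
          simp [pvBStep, hs]
        simp only [List.foldl_cons, hstep]
        rw [ih1]
        simp [pvCollect, hs]
      · have hstep : pvBStep (out, some (pe, vs)) ent = pvBStep (out ++ [(pe, some "POLYLINE", vs)], none) ent := by
          simp [pvBStep, hv, hs]
        simp only [List.foldl_cons, hstep]
        have := h1 (out ++ [(pe, some "POLYLINE", vs)])
        simp only [List.foldl_cons] at this
        rw [this]
        simp [pvCollect, hv, hs]

-- ===== VERDICT (by name: the statement is the Claim_ definition above) =====
theorem walk_entities_py_spec : Claim_equal_walk_entities_py := by
  intro raw _
  unfold Spec_walk_entities_py walk_entities_py_alt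
  rw [(pvKey raw).1 []]
  simp
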